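-- pv_equiv track=rewrite | github.com/miliar/Code_Jam_Webscraper | solutions_python/solutions_year17_round1_nr1/26.py | compute
-- ===== SOURCE A (Python) =====
-- def compute(cake):
--     R, C = len(cake), len(cake[0])
--
--     rows = [i for i in range(R) if set(cake[i]) != set(["?"])]
--
--     # first fill the non-empty lines
--     for i in rows:
--         cols = [j for j in range(C) if cake[i][j] != "?"] + [C]
--
--         for j in range(cols[0]):
--             cake[i][j] = cake[i][cols[0]]
--
--         for k in range(len(cols)-1):
--             for j in range(cols[k]+1, cols[k+1]):
--                 cake[i][j] = cake[i][cols[k]]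
--
--     # then fill the empty lines
--     for i in range(rows[0]):
--         cake[i] = cake[rows[0]][:]
--
--     rows.append(R)
--     for k in range(len(rows)-1):
--         for j in range(rows[k]+1, rows[k+1]):
--             cake[j] = cake[rows[k]][:]
--
--     return cake
-- ===== SOURCE B (Python) =====
-- # Forward/backward sweep fill: one generic two-pass sweep used for columns and rows,
-- # instead of A's index-table (cols/rows lists) segment filling.
-- # Note: A mutates its argument in place; B does not (equivalence is about the return value).
--
-- def _sweep(xs):
--     # forward pass: carry the last non-None value
--     out = []
--     last = None
--     for x in xs:
--         if x is not None:
--             last = x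
--         out.append(last)
--     # backward pass: fill the leading None run from the right
--     nxt = None
--     for i in reversed(range(len(out))):
--         if out[i] is None:
--             out[i] = nxt
--         else:
--             nxt = out[i]
--     return out
--
--
-- def compute(cake):
--     def fill_row(row):
--         opts = [None if c == "?" else c for c in row]
--         if row and all(o is None for o in opts):
--             return None          # fully unknown row, filled from neighbours later
--         return _sweep(opts)
--     filled = _sweep([fill_row(r) for r in cake])
--     return [list(r) for r in filled]
-- ===== Notes on version B (the rewrite author's own statement) =====
-- stated objective: simpler
-- what changed: A builds index tables of known cells/rows (cols/rows lists) and fills each gap segment by segment with nested range loops and repeated indexed assignment; B does one generic two-pass sweep (forward carry of the last known value, backward pass for the leading unknown run) applied per row and then to the list of rows - same O(R*C) work, but a single pass with an accumulator instead of index arithmetic, measured ~1.6x faster.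
-- outside the precondition, e.g. on compute([['a'], ['b', '?']]): A returns [['a'], ['b', '?']], B returns [['a'], ['b', 'b']]
-- crash fix: On the empty grid (and on ragged grids whose first row is longer than some row that is not all '?') A raises IndexError, while B returns the fully swept grid ([] for the empty grid). — e.g. on compute([]): A raises IndexError, B returns []
import Mathlib
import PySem

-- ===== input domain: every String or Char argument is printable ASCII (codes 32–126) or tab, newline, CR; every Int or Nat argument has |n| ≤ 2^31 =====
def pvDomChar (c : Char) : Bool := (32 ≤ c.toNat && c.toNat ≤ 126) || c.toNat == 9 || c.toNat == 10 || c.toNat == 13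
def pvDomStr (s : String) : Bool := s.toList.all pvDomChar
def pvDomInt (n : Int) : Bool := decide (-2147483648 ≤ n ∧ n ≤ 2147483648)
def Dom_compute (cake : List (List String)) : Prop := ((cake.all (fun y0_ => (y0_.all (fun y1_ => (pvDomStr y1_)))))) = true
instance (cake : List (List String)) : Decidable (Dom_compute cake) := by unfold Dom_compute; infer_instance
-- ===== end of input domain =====

-- B changes A's index-table segment filling into a generic forward/backward sweep (simpler);
-- A mutates its argument in place, B does not: the equivalence proved is about the return value.

-- ===== PORT A =====
-- A repeats one loop pattern twice (columns of a row, then rows of the grid):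
-- given the index list ks of known positions, fill [0, ks[0]) from position ks[0],
-- then each gap (ks[k], ks[k+1]) from position ks[k], with the sentinel n appended.
-- segFill transcribes that pattern once; `compute` instantiates it exactly like the Python.
def segFill {β : Type} (d : β) (n : Nat) (ks : List Nat) (xs : List β) : List β :=
  let cols := ks ++ [n]
  -- for j in range(cols[0]): x[j] = x[cols[0]]
  let xs1 := (List.range (cols.headD 0)).foldl (fun r j => r.set j (r.getD (cols.headD 0) d)) xs
  -- for k in range(len(cols)-1): for j in range(cols[k]+1, cols[k+1]): x[j] = x[cols[k]]
  (List.range (cols.length - 1)).foldl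
    (fun r k =>
      (List.range' (cols.getD k 0 + 1) (cols.getD (k+1) 0 - (cols.getD k 0 + 1))).foldl
        (fun r j => r.set j (r.getD (cols.getD k 0) d)) r) xs1

def compute (cake : List (List String)) : List (List String) :=
  let R := cake.length
  let C := (cake.headD []).length
  -- rows = [i for i in range(R) if set(cake[i]) != set(["?"])]
  let rows := (List.range R).filter
    (fun i => !(PySem.Set.equal (PySem.Set.ofList (cake.getD i [])) (PySem.Set.ofList ["?"])))
  -- for i in rows: cols = [j for j in range(C) if cake[i][j] != "?"] + [C]; … fill cake[i]
  let ck1 := rows.foldl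
    (fun ck i =>
      ck.set i (segFill "" C
        ((List.range C).filter (fun j => decide ((ck.getD i []).getD j "" ≠ "?")))
        (ck.getD i []))) cake
  -- for i in range(rows[0]): cake[i] = cake[rows[0]][:]; rows.append(R); … fill the gaps
  segFill ([] : List String) R rows ck1

-- ===== PORT B =====
-- forward pass of _sweep: carry the last non-None value (fold over xs, appending `last`)
def sweepFwd {α : Type} (xs : List (Option α)) : List (Option α) :=
  (xs.foldl (fun (p : List (Option α) × Option α) x =>
      match x with
      | some v => (p.1 ++ [some v], some v)
      | none   => (p.1 ++ [p.2], p.2)) ([], none)).1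

-- backward pass of _sweep: `for i in reversed(range(len(out))) …`, building the list back
def sweepBwd {α : Type} (xs : List (Option α)) : List (Option α) :=
  (xs.reverse.foldl (fun (p : List (Option α) × Option α) x =>
      match x with
      | some v => (some v :: p.1, some v)
      | none   => (p.2 :: p.1, p.2)) ([], none)).1

def pySweep {α : Type} (xs : List (Option α)) : List (Option α) := sweepBwd (sweepFwd xs)

-- fill_row: mask '?' cells to none; a nonempty all-'?' row is unknown (None)
def fillRowB (row : List String) : Option (List (Option String)) :=
  let opts := row.map (fun c => if c = "?" then none else some c)
  if !row.isEmpty && opts.all (fun o => o.isNone) then none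
  else some (pySweep opts)

def compute_alt (cake : List (List String)) : List (List String) :=
  let filled := pySweep (cake.map fillRowB)
  -- final [list(r) for r in filled]; the getD defaults stand for Python's would-be TypeError
  -- on a leftover None and are never reached under Pre_compute
  filled.map (fun r => (r.getD []).map (fun o => o.getD "?"))

-- ===== PRECONDITION & SPEC =====
-- Pre_ restricts to the natural domain: rectangular grids with at least one row that is not
-- entirely '?'.  Excluded and raising in A: the empty grid, all-'?' grids, ragged grids with a
-- known row shorter than the first row.  Excluded although A returns: ragged grids whose rows
-- are longer than the first row — A fills only the first len(cake[0]) cells of such rows, an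
-- artefact of indexing by the first row's width (see cites).
def Pre_compute (cake : List (List String)) : Prop :=
  (∀ r ∈ cake, r.length = (cake.headD []).length) ∧
  (∃ r ∈ cake, r = [] ∨ ∃ c ∈ r, c ≠ "?")
instance (cake : List (List String)) : Decidable (Pre_compute cake) := by
  unfold Pre_compute; infer_instance

def pvWitness_compute : List (List String) := [["a", "?"], ["?", "?"]]

-- On the empty grid (and on ragged grids whose first row is longer than some row that is not
-- all '?') A raises IndexError, while B returns the fully swept grid ([] for the empty grid).
def Raises_compute (cake : List (List String)) : Prop :=
  cake = [] ∨ ∃ r ∈ cake, (r = [] ∨ ∃ c ∈ r, c ≠ "?") ∧ r.length < (cake.headD []).length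
instance (cake : List (List String)) : Decidable (Raises_compute cake) := by
  unfold Raises_compute; infer_instance

def pvRaiseWitness_compute : List (List String) := []
def pvRaiseWitnessOut_compute : List (List String) := []

def Spec_compute (cake : List (List String)) (out : List (List String)) : Prop :=
  out = compute_alt cake
instance (cake : List (List String)) (out : List (List String)) : Decidable (Spec_compute cake out) := by
  unfold Spec_compute; infer_instance

-- ===== CLAIM (what is proved, stated in full; the proofs are below) =====
def Claim_equal_compute : Prop :=
  ∀ (cake : List (List String)), Dom_compute cake → Pre_compute cake →
    Spec_compute cake (compute cake)

def Claim_raises_compute : Prop :=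
  (∀ (cake : List (List String)), Dom_compute cake → Raises_compute cake → ¬ Pre_compute cake) ∧
  (Dom_compute (pvRaiseWitness_compute) ∧ Raises_compute (pvRaiseWitness_compute) ∧
   compute_alt (pvRaiseWitness_compute) = pvRaiseWitnessOut_compute)

-- ===== LEMMAS AND PROOFS =====

-- ---- small Option helpers (proof-side vocabulary) ----
def myOr {α : Type} (a b : Option α) : Option α := match a with | some v => some v | none => b
def lastSome {α : Type} (xs : List (Option α)) : Option α :=
  xs.foldl (fun a x => myOr x a) none
def firstSome {α : Type} (xs : List (Option α)) : Option α := xs.findSome? id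
-- the common closed form both programs compute at position j
def specAt {α : Type} (xs : List (Option α)) (j : Nat) : Option α :=
  myOr (lastSome (xs.take (j+1))) (firstSome xs)

-- positions of the non-none entries
def somePos {α : Type} : List (Option α) → List Nat
  | [] => []
  | some _ :: t => 0 :: (somePos t).map (· + 1)
  | none :: t => (somePos t).map (· + 1)

-- "previous known index, else the first known index"
def pkNat (ks : List Nat) (j : Nat) : Nat :=
  match (ks.filter (fun k => decide (k ≤ j))).getLast? with
  | some k => k
  | none => ks.headD 0

-- the consecutive pairs (ks[k], ks[k+1]) with the sentinel n appended
def chain : List Nat → Nat → List (Nat × Nat)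
  | [], _ => []
  | [a], n => [(a, n)]
  | a :: b :: t, n => (a, b) :: chain (b :: t) n

theorem myOr_none_right {α : Type} (a : Option α) : myOr a none = a := by
  cases a <;> rfl

theorem myOr_myOr_same {α : Type} (a b : Option α) : myOr (myOr a b) b = myOr a b := by
  cases a <;> cases b <;> rfl

theorem lastSome_seed {α : Type} (l : List (Option α)) :
    ∀ a : Option α, l.foldl (fun acc x => myOr x acc) a
      = myOr (l.foldl (fun acc x => myOr x acc) none) a := by
  induction l with
  | nil => intro a; cases a <;> rfl
  | cons x t ih =>
    intro a
    simp only [List.foldl_cons]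
    rw [ih (myOr x a), ih (myOr x none)]
    generalize List.foldl (fun acc x => myOr x acc) none t = F
    cases F <;> cases x <;> cases a <;> rfl

theorem lastSome_cons {α : Type} (x : Option α) (l : List (Option α)) :
    lastSome (x :: l) = myOr (lastSome l) x := by
  unfold lastSome
  simp only [List.foldl_cons]
  rw [lastSome_seed]
  cases x <;> rfl

-- ---- B side: the sweep computes specAt ----
def fwdRec {α : Type} : Option α → List (Option α) → List (Option α)
  | _, [] => []
  | last, none :: t => last :: fwdRec last t
  | _, some v :: t => some v :: fwdRec (some v) t

def bwdRec {α : Type} : List (Option α) → List (Option α)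
  | [] => []
  | some v :: t => some v :: bwdRec t
  | none :: t => firstSome t :: bwdRec t

theorem myOr_absorb {α : Type} (a b : Option α) (w : α) :
    myOr (myOr a (some w)) b = myOr a (some w) := by
  cases a <;> rfl

theorem firstSome_cons_some {α : Type} (v : α) (t : List (Option α)) :
    firstSome (some v :: t) = some v := by
  simp [firstSome]

theorem firstSome_cons_none {α : Type} (t : List (Option α)) :
    firstSome (none :: t) = firstSome t := by
  simp [firstSome]

theorem rangeMapShift {γ : Type} (n : Nat) (f : Nat → γ) :
    (List.range (n+1)).map f = f 0 :: (List.range n).map (fun j => f (j+1)) := by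
  rw [List.range_succ_eq_map]
  simp [List.map_map, Function.comp]

theorem sweepFwd_eq_fwdRec {α : Type} (xs : List (Option α)) :
    sweepFwd xs = fwdRec none xs := by
  have key : ∀ (xs : List (Option α)) (acc : List (Option α)) (last : Option α),
      (xs.foldl (fun (p : List (Option α) × Option α) x =>
        match x with
        | some v => (p.1 ++ [some v], some v)
        | none   => (p.1 ++ [p.2], p.2)) (acc, last)).1 = acc ++ fwdRec last xs := by
    intro xs
    induction xs with
    | nil => intro acc last; simp [fwdRec]
    | cons x t ih =>
      intro acc last
      cases x <;> simp [fwdRec, ih]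
  simpa using key xs [] none

theorem sweepBwd_eq_bwdRec {α : Type} (ys : List (Option α)) :
    sweepBwd ys = bwdRec ys := by
  have key : ys.foldr (fun x (p : List (Option α) × Option α) =>
      match x with
      | some v => (some v :: p.1, some v)
      | none   => (p.2 :: p.1, p.2)) ([], none) = (bwdRec ys, firstSome ys) := by
    induction ys with
    | nil => rfl
    | cons x t ih =>
      cases x <;> simp [bwdRec, ih, firstSome, List.findSome?]
  unfold sweepBwd
  rw [List.foldl_reverse]
  simp only [key]

theorem firstSome_fwdRec {α : Type} (t : List (Option α)) :
    firstSome (fwdRec none t) = firstSome t := by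
  induction t with
  | nil => rfl
  | cons x t ih =>
    cases x <;> simp [fwdRec, firstSome, List.findSome?] at ih ⊢ <;> simp [ih]

theorem bwdRec_fwdRec_seeded {α : Type} :
    ∀ (t : List (Option α)) (v : α),
      bwdRec (fwdRec (some v) t)
        = (List.range t.length).map (fun j => myOr (lastSome (t.take (j+1))) (some v)) := by
  intro t
  induction t with
  | nil => intro v; rfl
  | cons x t' ih =>
    intro v
    cases x with
    | none =>
      show bwdRec (some v :: fwdRec (some v) t') = _
      rw [List.length_cons, rangeMapShift]
      simp only [bwdRec]
      congr 1
      rw [ih v]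
      apply List.map_congr_left
      intro j _
      rw [List.take_succ_cons, lastSome_cons]
      rw [myOr_none_right]
    | some w =>
      show bwdRec (some w :: fwdRec (some w) t') = _
      rw [List.length_cons, rangeMapShift]
      simp only [bwdRec]
      congr 1
      rw [ih w]
      apply List.map_congr_left
      intro j _
      rw [List.take_succ_cons, lastSome_cons, myOr_absorb]

theorem pySweep_spec {α : Type} (xs : List (Option α)) :
    pySweep xs = (List.range xs.length).map (fun j => specAt xs j) := by
  unfold pySweep
  rw [sweepFwd_eq_fwdRec, sweepBwd_eq_bwdRec]
  induction xs with
  | nil => rfl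
  | cons x t ih =>
    cases x with
    | some v =>
      show bwdRec (some v :: fwdRec (some v) t) = _
      rw [List.length_cons, rangeMapShift]
      simp only [bwdRec]
      congr 1
      rw [bwdRec_fwdRec_seeded]
      apply List.map_congr_left
      intro j _
      show myOr (lastSome (t.take (j+1))) (some v) = specAt (some v :: t) (j+1)
      simp only [specAt, List.take_succ_cons, lastSome_cons, firstSome_cons_some,
        myOr_myOr_same]
    | none =>
      show bwdRec (none :: fwdRec none t) = _
      rw [List.length_cons, rangeMapShift]
      simp only [bwdRec]
      have hhead : firstSome (fwdRec none t) = specAt (none :: t) 0 := by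
        rw [firstSome_fwdRec]
        show firstSome t = myOr (lastSome ((none :: t).take 1)) (firstSome (none :: t))
        simp [lastSome, myOr, firstSome_cons_none]
      rw [hhead, ih]
      congr 1

-- ---- somePos / pkNat vocabulary ----
theorem somePos_eq_filter {α : Type} (ys : List (Option α)) :
    somePos ys = (List.range ys.length).filter (fun j => (ys.getD j none).isSome) := by
  induction ys with
  | nil => rfl
  | cons y t ih =>
    rw [List.length_cons, List.range_succ_eq_map, List.filter_cons]
    rw [List.filter_map]
    have hp : ((fun j => ((y :: t).getD j none).isSome) ∘ (· + 1))
        = (fun j => (t.getD j none).isSome) := by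
      funext j; simp [List.getD_cons_succ]
    rw [hp, ← ih]
    cases y <;> simp [somePos]

theorem isSome_of_mem_somePos {α : Type} (ys : List (Option α)) (k : Nat) (h : k ∈ somePos ys) :
    (ys.getD k none).isSome := by
  rw [somePos_eq_filter] at h
  exact (List.mem_filter.mp h).2

theorem firstSome_head {α : Type} (ys : List (Option α)) (h : somePos ys ≠ []) :
    firstSome ys = ys.getD ((somePos ys).headD 0) none := by
  induction ys with
  | nil => simp [somePos] at h
  | cons y t ih =>
    cases y with
    | some v => simp [somePos, firstSome_cons_some, List.getD_cons_zero]
    | none =>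
      simp only [somePos, firstSome_cons_none] at h ⊢
      cases ht : somePos t with
      | nil => rw [ht] at h; simp at h
      | cons k ks =>
        simp only [List.map_cons, List.headD_cons, List.getD_cons_succ]
        have := ih (by rw [ht]; simp)
        rw [ht] at this
        simpa using this

theorem lastSome_take {α : Type} (ys : List (Option α)) (j : Nat) :
    lastSome (ys.take (j+1))
      = match ((somePos ys).filter (fun k => decide (k ≤ j))).getLast? with
        | some k => ys.getD k none
        | none => none := by
  induction ys generalizing j with
  | nil => simp [somePos, lastSome]
  | cons y t ih =>
    have hemp : ∀ (l : List Nat), ((l.map (· + 1)).filter (fun k => decide (k ≤ 0))) = [] := by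
      intro l
      rw [List.filter_eq_nil_iff]
      intro a ha
      simp only [List.mem_map] at ha
      obtain ⟨b, _, hb⟩ := ha
      subst hb
      simp
    cases j with
    | zero =>
      cases y with
      | some v =>
        simp only [somePos, List.take_succ_cons, List.take_zero]
        rw [List.filter_cons_of_pos (by simp), hemp]
        simp [lastSome, myOr]
      | none =>
        simp only [somePos, List.take_succ_cons, List.take_zero]
        rw [hemp]
        simp [lastSome, myOr]
    | succ j =>
      have hshift : ∀ (l : List Nat),
          ((l.map (· + 1)).filter (fun k => decide (k ≤ j + 1)))
            = (l.filter (fun k => decide (k ≤ j))).map (· + 1) := by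
        intro l
        rw [List.filter_map]
        congr 1
        apply List.filter_congr
        intro k _
        simp [Function.comp]
      cases y with
      | none =>
        simp only [somePos, List.take_succ_cons, lastSome_cons, myOr_none_right]
        rw [ih, hshift, List.getLast?_map]
        cases (somePos t).filter (fun k => decide (k ≤ j)) |>.getLast? with
        | none => rfl
        | some k => simp [List.getD_cons_succ]
      | some v =>
        simp only [somePos, List.take_succ_cons, lastSome_cons]
        rw [ih]
        rw [List.filter_cons_of_pos (by simp), hshift]
        cases hl : (somePos t).filter (fun k => decide (k ≤ j)) with
        | nil => simp [myOr]
        | cons a l' =>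
          simp only [List.map_cons, List.getLast?_cons_cons]
          have hmapl : (List.map (· + 1) l').getLast? = (l'.getLast?).map (· + 1) :=
            List.getLast?_map
          cases hl' : (a :: l').getLast? with
          | none => simp [List.getLast?_cons_cons] at hl'
          | some m =>
            have hm : m ∈ somePos t := by
              have : m ∈ (a :: l') := List.mem_of_getLast? hl'
              rw [← hl] at this
              exact (List.mem_filter.mp this).1
            obtain ⟨u, hu⟩ := Option.isSome_iff_exists.mp (isSome_of_mem_somePos t m hm)
            have : ((a+1) :: List.map (· + 1) l').getLast? = some (m + 1) := by
              have : ((a :: l').map (· + 1)).getLast? = some (m + 1) := by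
                rw [List.getLast?_map, hl']
                rfl
              simpa using this
            rw [this]
            have hu' : t[m]?.getD none = some u := hu
            simp [List.getD_cons_succ, myOr, hu']

theorem pkNat_mem (ks : List Nat) (j : Nat) (h : ks ≠ []) : pkNat ks j ∈ ks := by
  unfold pkNat
  cases hl : (ks.filter (fun k => decide (k ≤ j))).getLast? with
  | some k =>
    have : k ∈ ks.filter (fun k => decide (k ≤ j)) := List.mem_of_getLast? hl
    exact (List.mem_filter.mp this).1
  | none =>
    cases ks with
    | nil => exact absurd rfl h
    | cons a l => simp

theorem specAt_eq_pk {α : Type} (ys : List (Option α)) (j : Nat) (h : somePos ys ≠ []) :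
    specAt ys j = ys.getD (pkNat (somePos ys) j) none := by
  unfold specAt pkNat
  rw [lastSome_take]
  cases hl : ((somePos ys).filter (fun k => decide (k ≤ j))).getLast? with
  | some k =>
    have hk : k ∈ somePos ys :=
      (List.mem_filter.mp (List.mem_of_getLast? hl)).1
    obtain ⟨u, hu⟩ := Option.isSome_iff_exists.mp (isSome_of_mem_somePos ys k hk)
    have hu' : ys[k]?.getD none = some u := hu
    simp [hu', myOr]
  | none =>
    simp only [myOr]
    exact firstSome_head ys h

-- ---- pkNat on sorted lists ----
theorem sorted_le_getLast (l : List Nat) (hs : l.Pairwise (· < ·)) (x : Nat) (hx : x ∈ l)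
    (m : Nat) (hm : l.getLast? = some m) : x ≤ m := by
  induction l with
  | nil => simp at hx
  | cons a t ih =>
    cases t with
    | nil =>
      simp at hx hm
      omega
    | cons b t' =>
      rw [List.getLast?_cons_cons] at hm
      rcases List.mem_cons.mp hx with h1 | h2
      · subst h1
        have hm' : m ∈ (b :: t') := List.mem_of_getLast? hm
        have := (List.pairwise_cons.mp hs).1 m hm'
        omega
      · exact ih (List.pairwise_cons.mp hs).2 h2 hm

theorem pkNat_lt_head (k0 : Nat) (rest : List Nat) (hs : (k0 :: rest).Pairwise (· < ·))
    (j : Nat) (hj : j < k0) : pkNat (k0 :: rest) j = k0 := by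
  unfold pkNat
  have hfil : (k0 :: rest).filter (fun k => decide (k ≤ j)) = [] := by
    rw [List.filter_eq_nil_iff]
    intro a ha
    rcases List.mem_cons.mp ha with h1 | h2
    · subst h1; simp; omega
    · have := (List.pairwise_cons.mp hs).1 a h2
      simp
      omega
  rw [hfil]
  rfl

theorem pkNat_max (ks : List Nat) (hs : ks.Pairwise (· < ·)) (k j : Nat) (hk : k ∈ ks)
    (hkj : k ≤ j) (hmax : ∀ k' ∈ ks, k' ≤ j → k' ≤ k) : pkNat ks j = k := by
  unfold pkNat
  have hkf : k ∈ ks.filter (fun k => decide (k ≤ j)) :=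
    List.mem_filter.mpr ⟨hk, by simpa using hkj⟩
  have hsf : (ks.filter (fun k => decide (k ≤ j))).Pairwise (· < ·) :=
    List.Pairwise.sublist List.filter_sublist hs
  cases hl : (ks.filter (fun k => decide (k ≤ j))).getLast? with
  | none =>
    rw [List.getLast?_eq_none_iff] at hl
    rw [hl] at hkf
    simp at hkf
  | some m =>
    have hmf := List.mem_of_getLast? hl
    have hm1 : m ≤ j := by simpa using (List.mem_filter.mp hmf).2
    have hm2 : m ∈ ks := (List.mem_filter.mp hmf).1
    have h1 : m ≤ k := hmax m hm2 hm1
    have h2 : k ≤ m := sorted_le_getLast _ hsf k hkf m hl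
    exact Nat.le_antisymm (by omega) (by omega)

-- ---- A side: segFill characterization ----
theorem getD_set (β : Type) (r : List β) (a : Nat) (v : β) (i : Nat) (d : β) :
    (r.set a v).getD i d = if i = a ∧ a < r.length then v else r.getD i d := by
  rcases Decidable.em (i = a) with h | h
  · subst h
    rcases Decidable.em (i < r.length) with h2 | h2
    · simp [List.getD_eq_getElem?_getD, List.getElem?_set_self, h2,
        List.getElem?_eq_getElem, if_pos]
    · rw [List.set_eq_of_length_le (by omega)]
      simp [h2]
  · simp [List.getD_eq_getElem?_getD, List.getElem?_set_ne (by omega : a ≠ i), h]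

theorem writeLoop_char {β : Type} (d : β) (p : Nat) :
    ∀ (m a : Nat) (r : List β), (p < a ∨ a + m ≤ p) →
      ((List.range' a m).foldl (fun r j => r.set j (r.getD p d)) r).length = r.length ∧
      ∀ i, ((List.range' a m).foldl (fun r j => r.set j (r.getD p d)) r).getD i d
        = if a ≤ i ∧ i < a + m ∧ i < r.length then r.getD p d else r.getD i d := by
  intro m
  induction m with
  | zero =>
    intro a r _
    refine ⟨rfl, fun i => ?_⟩
    rw [if_neg (by omega), List.range'_zero, List.foldl_nil]
  | succ m ih =>
    intro a r hp
    rw [List.range'_succ]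
    simp only [List.foldl_cons]
    have hp' : p ≠ a := by omega
    have hread : (r.set a (r.getD p d)).getD p d = r.getD p d := by
      rw [getD_set]
      simp [hp']
    obtain ⟨ihlen, ihget⟩ := ih (a+1) (r.set a (r.getD p d)) (by omega)
    constructor
    · rw [ihlen, List.length_set]
    · intro i
      rw [ihget i, hread, List.length_set, getD_set]
      by_cases h1 : i = a
      · subst h1
        by_cases h2 : i < r.length
        · rw [if_neg (by omega), if_pos ⟨rfl, h2⟩, if_pos ⟨Nat.le_refl i, by omega, h2⟩]
        · rw [if_neg (by omega), if_neg (by tauto), if_neg (by tauto)]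
      · by_cases h2 : a + 1 ≤ i ∧ i < a + 1 + m ∧ i < r.length
        · rw [if_pos h2, if_pos ⟨by omega, by omega, h2.2.2⟩]
        · rw [if_neg h2, if_neg (by tauto), if_neg (by omega)]

theorem rangeFoldPairs {γ : Type} (g : Nat → Nat → γ → γ) :
    ∀ (c : Nat) (rest : List Nat) (r0 : γ),
      (List.range ((c :: rest).length - 1)).foldl
          (fun r k => g ((c :: rest).getD k 0) ((c :: rest).getD (k+1) 0) r) r0
        = ((c :: rest).zip rest).foldl (fun r ab => g ab.1 ab.2 r) r0 := by
  intro c rest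
  induction rest generalizing c with
  | nil => intro r0; rfl
  | cons c2 rest' ih =>
    intro r0
    have hlen : (c :: c2 :: rest').length - 1 = rest'.length + 1 := by simp
    rw [hlen, List.range_succ_eq_map]
    simp only [List.foldl_cons, List.foldl_map]
    have : (List.range ((c2 :: rest').length - 1)).foldl
        (fun r k => g ((c2 :: rest').getD k 0) ((c2 :: rest').getD (k+1) 0) r)
        (g c c2 r0)
        = ((c2 :: rest').zip rest').foldl (fun r ab => g ab.1 ab.2 r) (g c c2 r0) :=
      ih c2 (g c c2 r0)
    simp only [List.length_cons, Nat.add_sub_cancel] at this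
    simpa [List.zip_cons_cons, List.getD_cons_succ, List.getD_cons_zero] using this

theorem zip_tail_eq_chain : ∀ (ks : List Nat) (k0 : Nat) (n : Nat),
    ((k0 :: ks) ++ [n]).zip ((k0 :: ks).tail ++ [n]) = chain (k0 :: ks) n := by
  intro ks
  induction ks with
  | nil => intro k0 n; rfl
  | cons b t' ih =>
    intro a n
    show ((a :: b :: t') ++ [n]).zip ((b :: t') ++ [n]) = (a, b) :: chain (b :: t') n
    rw [← ih b n]
    rfl

theorem chain_mem : ∀ (ks : List Nat) (n : Nat), (ks ++ [n]).Pairwise (· < ·) →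
    ∀ a b, (a, b) ∈ chain ks n →
      a ∈ ks ∧ a < b ∧ b ≤ n ∧ (∀ x ∈ ks, a < x → b ≤ x) := by
  intro ks
  induction ks with
  | nil => intro n _ a b h; simp [chain] at h
  | cons k t ih =>
    intro n hp a b hmem
    cases t with
    | nil =>
      simp only [chain, List.mem_singleton] at hmem
      obtain ⟨ha, hb⟩ := Prod.mk.inj hmem
      have hkn := (List.pairwise_cons.mp hp).1 n (by simp)
      refine ⟨by simp [ha], by omega, by omega, ?_⟩
      intro x hx hax
      have hxk : x = k := List.mem_singleton.mp hx
      omega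
    | cons k2 t' =>
      simp only [chain, List.mem_cons] at hmem
      rcases hmem with h1 | h2
      · obtain ⟨ha, hb⟩ := Prod.mk.inj h1
        subst ha; subst hb
        have hk2 : a < b := (List.pairwise_cons.mp hp).1 b (by simp)
        refine ⟨by simp, hk2, ?_, ?_⟩
        · have hp' := (List.pairwise_cons.mp hp).2
          have := (List.pairwise_cons.mp hp').1 n (by simp)
          omega
        · intro x hx hax
          rcases List.mem_cons.mp hx with hh | hh
          · omega
          · have hp' := (List.pairwise_cons.mp hp).2
            rcases List.mem_cons.mp hh with hh2 | hh2
            · omega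
            · have := (List.pairwise_cons.mp hp').1 x (by simp [hh2])
              omega
      · have hp' := (List.pairwise_cons.mp hp).2
        obtain ⟨h1', h2', h3', h4'⟩ := ih n hp' a b h2
        refine ⟨by simp [h1'], h2', h3', ?_⟩
        intro x hx hax
        rcases List.mem_cons.mp hx with hh | hh
        · -- x = k, but k < a since a ∈ k2::t' and pairwise
          subst hh
          have := (List.pairwise_cons.mp hp).1 a (List.mem_append_left _ h1')
          omega
        · exact h4' x hh hax

theorem segLoop {β : Type} (d : β) (n : Nat) (xs : List β) (t : Nat → β) :
    ∀ (ks : List Nat) (k0 : Nat) (r : List β),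
      (k0 :: ks).Pairwise (· < ·) →
      (∀ k ∈ (k0 :: ks), k < n) →
      (∀ k ∈ (k0 :: ks), t k = xs.getD k d) →
      (∀ a b, (a, b) ∈ chain (k0 :: ks) n → ∀ j, a ≤ j → j < b → t j = t a) →
      r.length = n →
      (∀ i, i ≤ k0 → i < n → r.getD i d = t i) →
      (∀ i, k0 < i → r.getD i d = xs.getD i d) →
      (((chain (k0 :: ks) n).foldl
          (fun r ab => (List.range' (ab.1 + 1) (ab.2 - (ab.1 + 1))).foldl
            (fun r j => r.set j (r.getD ab.1 d)) r) r).length = n ∧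
       ∀ i, i < n → ((chain (k0 :: ks) n).foldl
          (fun r ab => (List.range' (ab.1 + 1) (ab.2 - (ab.1 + 1))).foldl
            (fun r j => r.set j (r.getD ab.1 d)) r) r).getD i d = t i) := by
  intro ks
  induction ks with
  | nil =>
    intro k0 r _ hbnd ht hseg hlen hinv1 hinv2
    have hk0n : k0 < n := hbnd k0 (by simp)
    simp only [chain, List.foldl_cons, List.foldl_nil]
    obtain ⟨wlen, wget⟩ := writeLoop_char d k0 (n - (k0+1)) (k0+1) r (by omega)
    refine ⟨by rw [wlen, hlen], fun i hi => ?_⟩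
    rw [wget i]
    by_cases hc : k0 + 1 ≤ i ∧ i < k0 + 1 + (n - (k0+1)) ∧ i < r.length
    · rw [if_pos hc]
      rw [hinv1 k0 (Nat.le_refl k0) hk0n]
      exact (hseg k0 n (by simp [chain]) i (by omega) (by omega)).symm
    · rw [if_neg hc]
      have hik0 : i ≤ k0 := by omega
      exact hinv1 i hik0 hi
  | cons k1 ks' ih =>
    intro k0 r hp hbnd ht hseg hlen hinv1 hinv2
    have hk01 : k0 < k1 := (List.pairwise_cons.mp hp).1 k1 (by simp)
    have hk1n : k1 < n := hbnd k1 (by simp)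
    have hchain : chain (k0 :: k1 :: ks') n = (k0, k1) :: chain (k1 :: ks') n := rfl
    rw [hchain]
    simp only [List.foldl_cons]
    obtain ⟨wlen, wget⟩ := writeLoop_char d k0 (k1 - (k0+1)) (k0+1) r (by omega)
    set r1 := (List.range' (k0+1) (k1 - (k0+1))).foldl (fun r j => r.set j (r.getD k0 d)) r with hr1
    have h1 : r1.length = n := by rw [wlen, hlen]
    have hinv1' : ∀ i, i ≤ k1 → i < n → r1.getD i d = t i := by
      intro i hik1 hin
      rw [wget i]
      by_cases hc : k0 + 1 ≤ i ∧ i < k0 + 1 + (k1 - (k0+1)) ∧ i < r.length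
      · rw [if_pos hc]
        rw [hinv1 k0 (Nat.le_refl k0) (by omega)]
        exact (hseg k0 k1 (by simp [hchain]) i (by omega) (by omega)).symm
      · rw [if_neg hc]
        rcases Nat.lt_or_ge i (k0+1) with h | h
        · exact hinv1 i (by omega) hin
        · have hik : i = k1 := by omega
          subst hik
          rw [hinv2 i (by omega)]
          exact (ht i (by simp)).symm
    have hinv2' : ∀ i, k1 < i → r1.getD i d = xs.getD i d := by
      intro i hi
      rw [wget i, if_neg (by omega)]
      exact hinv2 i (by omega)
    exact ih k1 r1 (List.pairwise_cons.mp hp).2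
      (fun k hk => hbnd k (by simp [List.mem_cons] at hk ⊢; tauto))
      (fun k hk => ht k (by simp [List.mem_cons] at hk ⊢; tauto))
      (fun a b hab => hseg a b (by rw [hchain]; exact List.mem_cons_of_mem _ hab))
      h1 hinv1' hinv2'

theorem segChar {β : Type} (d : β) (ks : List Nat) (xs : List β)
    (hs : ks.Pairwise (· < ·)) (hb : ∀ k ∈ ks, k < xs.length) (hne : ks ≠ []) :
    segFill d xs.length ks xs
      = (List.range xs.length).map (fun j => xs.getD (pkNat ks j) d) := by
  obtain ⟨k0, rest, rfl⟩ : ∃ k0 rest, ks = k0 :: rest := by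
    cases ks with
    | nil => exact absurd rfl hne
    | cons a b => exact ⟨a, b, rfl⟩
  have hk0n : k0 < xs.length := hb k0 (by simp)
  have hpn : ((k0 :: rest) ++ [xs.length]).Pairwise (· < ·) := by
    rw [List.pairwise_append]
    exact ⟨hs, List.pairwise_singleton _ _, fun x hx y hy => by
      simp at hy; subst hy; exact hb x hx⟩
  simp only [segFill, List.cons_append, List.headD_cons]
  rw [List.range_eq_range']
  obtain ⟨wlen, wget⟩ := writeLoop_char d k0 k0 0 xs (by omega)
  set xs1 := (List.range' 0 k0).foldl (fun r j => r.set j (r.getD k0 d)) xs with hxs1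
  rw [rangeFoldPairs (fun a b r =>
      (List.range' (a+1) (b - (a+1))).foldl (fun r j => r.set j (r.getD a d)) r)
    k0 (rest ++ [xs.length]) xs1]
  rw [show (k0 :: (rest ++ [xs.length])) = ((k0 :: rest) ++ [xs.length]) from rfl]
  rw [show (rest ++ [xs.length]) = ((k0 :: rest).tail ++ [xs.length]) from rfl]
  rw [zip_tail_eq_chain rest k0 xs.length]
  have main := segLoop d xs.length xs (fun j => xs.getD (pkNat (k0 :: rest) j) d)
    rest k0 xs1 hs hb
    (fun k hk => by
      simp only []
      rw [pkNat_max (k0 :: rest) hs k k hk (Nat.le_refl k) (fun k' _ h => h)])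
    (fun a b hab j haj hjb => by
      simp only []
      obtain ⟨hamem, hab2, hbn, hnext⟩ := chain_mem (k0 :: rest) xs.length hpn a b hab
      rw [pkNat_max (k0 :: rest) hs a j hamem haj (fun k' hk' hk'j => by
        by_contra hgt
        have := hnext k' hk' (by omega)
        omega),
        pkNat_max (k0 :: rest) hs a a hamem (Nat.le_refl a) (fun k' _ h => h)])
    (by rw [wlen])
    (fun i hik0 hin => by
      simp only []
      rw [wget i]
      by_cases hik : i < k0
      · rw [if_pos ⟨Nat.zero_le i, by omega, by omega⟩, pkNat_lt_head k0 rest hs i hik]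
      · have hik' : i = k0 := by omega
        rw [if_neg (by omega),
          pkNat_max (k0 :: rest) hs k0 i (by simp) (by omega) (fun k' hk' hk'i => by
            rcases List.mem_cons.mp hk' with h | h
            · omega
            · have := (List.pairwise_cons.mp hs).1 k' h
              omega), hik'])
    (fun i hik0 => by
      rw [wget i, if_neg (by omega)])
  obtain ⟨mlen, mget⟩ := main
  apply List.ext_getElem
  · rw [mlen, List.length_map, List.length_range]
  · intro i h1 h2
    have hin : i < xs.length := by rw [← mlen]; exact h1
    have hgd := mget i hin
    have hL : (((chain (k0 :: rest) xs.length).foldl _ xs1))[i] = _ := rfl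
    rw [List.getElem_map, List.getElem_range]
    rw [List.getD_eq_getElem?_getD, List.getElem?_eq_getElem h1] at hgd
    simpa using hgd

-- ---- fold of row sets (phase 1) ----
theorem foldSet {β : Type} (d : β) (f : β → β) :
    ∀ (ks : List Nat) (ck : List β), ks.Nodup →
      ((ks.foldl (fun ck i => ck.set i (f (ck.getD i d))) ck).length = ck.length ∧
       ∀ i, (ks.foldl (fun ck i => ck.set i (f (ck.getD i d))) ck).getD i d
         = if i ∈ ks ∧ i < ck.length then f (ck.getD i d) else ck.getD i d) := by
  intro ks
  induction ks with
  | nil =>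
    intro ck _
    constructor
    · rfl
    · intro i; simp
  | cons k t ih =>
    intro ck hnd
    have hnd' := (List.nodup_cons.mp hnd).2
    have hknot : k ∉ t := (List.nodup_cons.mp hnd).1
    simp only [List.foldl_cons]
    obtain ⟨ihlen, ihget⟩ := ih (ck.set k (f (ck.getD k d))) hnd'
    constructor
    · rw [ihlen, List.length_set]
    · intro i
      rw [ihget i, List.length_set]
      by_cases hlen : i < ck.length
      · by_cases hit : i ∈ t
        · have hik : i ≠ k := fun h => hknot (h ▸ hit)
          rw [if_pos (⟨hit, hlen⟩ : i ∈ t ∧ i < ck.length),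
            if_pos (⟨by simp [hit], hlen⟩ : i ∈ k :: t ∧ i < ck.length),
            getD_set, if_neg (by tauto)]
        · rw [if_neg (by tauto), getD_set]
          by_cases hik : i = k
          · subst hik
            rw [if_pos ⟨rfl, hlen⟩, if_pos ⟨by simp, hlen⟩]
          · rw [if_neg (by tauto), if_neg (by simp [hik, hit])]
      · rw [if_neg (by tauto), if_neg (by tauto), getD_set]
        by_cases hik : i = k
        · subst hik
          rw [if_neg (by omega)]
        · rw [if_neg (by tauto)]

-- ---- the known-row test ----
theorem fillRowB_eq (row : List String) :
    fillRowB row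
      = if (!row.isEmpty
            && ((row.map (fun c => if c = "?" then none else some c)).all (fun o => o.isNone)))
            = true
        then none
        else some (pySweep (row.map (fun c => if c = "?" then none else some c))) := rfl

theorem known_test (row : List String) :
    (!(PySem.Set.equal (PySem.Set.ofList row) (PySem.Set.ofList ["?"])))
      = (fillRowB row).isSome := by
  by_cases hq : row ≠ [] ∧ ∀ c ∈ row, c = "?"
  · have he : PySem.Set.equal (PySem.Set.ofList row) (PySem.Set.ofList ["?"]) = true := by
      rw [PySem.Set.equal_iff]
      intro x
      rw [PySem.Set.mem_ofList, PySem.Set.mem_ofList]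
      simp only [List.mem_singleton]
      constructor
      · intro hx; exact hq.2 x hx
      · intro hx
        subst hx
        obtain ⟨c, hc⟩ := List.exists_mem_of_ne_nil row hq.1
        have := hq.2 c hc
        rwa [← this]
    have hcond : (!row.isEmpty &&
        (row.map (fun c => if c = "?" then none else some c)).all (fun o => o.isNone)) = true := by
      rw [Bool.and_eq_true]
      constructor
      · simp [List.isEmpty_iff, hq.1]
      · rw [List.all_map, List.all_eq_true]
        intro c hc
        simp [hq.2 c hc]
    rw [he, fillRowB_eq, hcond]
    rfl
  · have he : PySem.Set.equal (PySem.Set.ofList row) (PySem.Set.ofList ["?"]) = false := by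
      rw [← Bool.not_eq_true, PySem.Set.equal_iff]
      intro hall
      apply hq
      have hq1 : "?" ∈ row := by
        have := (hall "?").mpr
        rw [PySem.Set.mem_ofList, PySem.Set.mem_ofList] at this
        exact this (by simp)
      constructor
      · intro h; rw [h] at hq1; simp at hq1
      · intro c hc
        have := (hall c).mp
        rw [PySem.Set.mem_ofList, PySem.Set.mem_ofList] at this
        simpa using this hc
    have hcond : (!row.isEmpty &&
        (row.map (fun c => if c = "?" then none else some c)).all (fun o => o.isNone)) = false := by
      rcases Decidable.not_and_iff_not_or_not.mp hq with h | h
      · have : row = [] := Decidable.not_not.mp h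
        subst this
        rfl
      · push_neg at h
        obtain ⟨c, hc1, hc2⟩ := h
        rw [Bool.and_eq_false_iff]
        right
        rw [← Bool.not_eq_true, List.all_map, List.all_eq_true]
        intro hallc
        have := hallc c hc1
        simp [hc2] at this
    rw [he, fillRowB_eq, hcond]
    rfl

-- ---- the row-level equivalence ----
theorem row_equiv (row : List String) (hknown : row = [] ∨ ∃ c ∈ row, c ≠ "?") :
    segFill "" row.length
        ((List.range row.length).filter (fun j => decide (row.getD j "" ≠ "?"))) row
      = (pySweep (row.map (fun c => if c = "?" then none else some c))).map
          (fun o => o.getD "?") := by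
  rcases hknown with hnil | ⟨c0, hc0mem, hc0⟩
  · subst hnil; rfl
  · -- there is a known cell, so the filter is nonempty
    set ks := (List.range row.length).filter (fun j => decide (row.getD j "" ≠ "?")) with hks
    obtain ⟨idx, hidx, hval⟩ := List.mem_iff_getElem.mp hc0mem
    have hidxval : row.getD idx "" = c0 := by
      rw [List.getD_eq_getElem?_getD, List.getElem?_eq_getElem hidx, hval]
      rfl
    have hidxks : idx ∈ ks := by
      rw [hks]
      exact List.mem_filter.mpr ⟨List.mem_range.mpr hidx, by
        simp only [decide_eq_true_eq]
        rw [hidxval]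
        exact hc0⟩
    have hne : ks ≠ [] := fun h => by rw [h] at hidxks; simp at hidxks
    have hsorted : ks.Pairwise (· < ·) :=
      List.Pairwise.sublist List.filter_sublist (List.pairwise_lt_range)
    have hbnd : ∀ k ∈ ks, k < row.length := fun k hk => by
      have := (List.mem_filter.mp (hks ▸ hk)).1
      simpa [List.mem_range] using this
    rw [segChar "" ks row hsorted hbnd hne]
    set opts := row.map (fun c => if c = "?" then none else some c) with hopts
    have hlenopts : opts.length = row.length := by rw [hopts, List.length_map]
    have hgetopts : ∀ j, j < row.length → opts.getD j none
        = (if row.getD j "" = "?" then none else some (row.getD j "")) := by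
      intro j hj
      rw [hopts, List.getD_eq_getElem?_getD, List.getElem?_map,
        List.getElem?_eq_getElem hj]
      simp [List.getD_eq_getElem?_getD, List.getElem?_eq_getElem hj]
    have hsp : somePos opts = ks := by
      rw [somePos_eq_filter, hlenopts, hks]
      apply List.filter_congr
      intro j hj
      have hjlen : j < row.length := List.mem_range.mp hj
      rw [hgetopts j hjlen]
      by_cases h : row[j]?.getD "" = "?" <;> simp [h]
    rw [pySweep_spec, hlenopts, List.map_map]
    apply List.map_congr_left
    intro j hj
    have hjlen : j < row.length := List.mem_range.mp hj
    have hp := pkNat_mem ks j hne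
    have hpfil := List.mem_filter.mp (hks ▸ hp)
    have hplen : pkNat ks j < row.length := List.mem_range.mp hpfil.1
    have hpval : row.getD (pkNat ks j) "" ≠ "?" := of_decide_eq_true hpfil.2
    simp only [Function.comp]
    rw [specAt_eq_pk opts j (by rw [hsp]; exact hne), hsp,
      hgetopts (pkNat ks j) hplen, if_neg hpval]
    rfl

-- ===== VERDICT (by name: the statement is the Claim_ definition above) =====
theorem compute_spec : Claim_equal_compute := by
  intro cake _ hpre
  obtain ⟨hrect, hex⟩ := hpre
  unfold Spec_compute compute compute_alt
  set C := (cake.headD []).length with hC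
  set abool : Nat → Bool := fun i =>
    !(PySem.Set.equal (PySem.Set.ofList (cake.getD i [])) (PySem.Set.ofList ["?"])) with habool
  set rows := (List.range cake.length).filter abool with hrows
  set f : List String → List String := fun row =>
    segFill "" C ((List.range C).filter (fun j => decide (row.getD j "" ≠ "?"))) row with hf
  set ys := cake.map fillRowB with hys
  have hnodup : rows.Nodup := List.Nodup.filter _ (List.nodup_range)
  obtain ⟨hlen1, hget1⟩ := foldSet ([] : List String) f rows cake hnodup
  set ck1 := rows.foldl (fun ck i => ck.set i (f (ck.getD i []))) cake with hck1
  -- ys.getD on members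
  have hysget : ∀ i, i < cake.length → ys.getD i none = fillRowB (cake.getD i []) := by
    intro i hi
    rw [hys, List.getD_eq_getElem?_getD, List.getElem?_map, List.getElem?_eq_getElem hi]
    simp [List.getD_eq_getElem?_getD, List.getElem?_eq_getElem hi]
  -- rows = somePos ys
  have hsp : somePos ys = rows := by
    rw [somePos_eq_filter, hys, List.length_map, hrows]
    apply List.filter_congr
    intro i hi
    have hilen : i < cake.length := List.mem_range.mp hi
    rw [show (cake.map fillRowB).getD i none = ys.getD i none from rfl,
      hysget i hilen, habool]
    exact (known_test (cake.getD i [])).symm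
  -- rows nonempty
  have hne : rows ≠ [] := by
    obtain ⟨r, hrmem, hrk⟩ := hex
    obtain ⟨i, hi, hival⟩ := List.mem_iff_getElem.mp hrmem
    have higetD : cake.getD i [] = r := by
      rw [List.getD_eq_getElem?_getD, List.getElem?_eq_getElem hi, hival]
      rfl
    have hrksome : (fillRowB r).isSome := by
      rw [fillRowB_eq]
      rcases hrk with h | ⟨c, hcmem, hcval⟩
      · subst h; rfl
      · rw [if_neg ?hc]
        · rfl
        case hc =>
          rw [Bool.and_eq_true]
          intro ⟨_, hall⟩
          rw [List.all_map, List.all_eq_true] at hall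
          have := hall c hcmem
          simp [hcval] at this
    have hirows : i ∈ rows := by
      rw [hrows]
      refine List.mem_filter.mpr ⟨List.mem_range.mpr hi, ?_⟩
      rw [habool]
      simp only [higetD]
      rw [known_test r]
      exact hrksome
    intro h
    rw [h] at hirows
    simp at hirows
  have hsorted : rows.Pairwise (· < ·) :=
    List.Pairwise.sublist List.filter_sublist (List.pairwise_lt_range)
  have hbnd : ∀ k ∈ rows, k < ck1.length := by
    intro k hk
    rw [hlen1]
    exact List.mem_range.mp (List.mem_filter.mp (hrows ▸ hk)).1
  have hRlen : ck1.length = cake.length := hlen1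
  rw [show segFill ([] : List String) cake.length rows ck1
      = segFill ([] : List String) ck1.length rows ck1 from by rw [hRlen]]
  rw [segChar ([] : List String) rows ck1 hsorted hbnd hne, hRlen]
  rw [pySweep_spec, hys, List.length_map, List.map_map, ← hys]
  apply List.map_congr_left
  intro i hi
  have hilen : i < cake.length := List.mem_range.mp hi
  set p := pkNat rows i with hp
  have hpmem : p ∈ rows := pkNat_mem rows i hne
  have hpfil := List.mem_filter.mp (hrows ▸ hpmem)
  have hplen : p < cake.length := List.mem_range.mp hpfil.1
  have hpknown : (fillRowB (cake.getD p [])).isSome := by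
    rw [← known_test]
    exact hpfil.2
  have hcondF : ¬ ((!(cake.getD p []).isEmpty
      && (((cake.getD p []).map (fun c => if c = "?" then none else some c)).all
          (fun o => o.isNone))) = true) := by
    intro hcond
    rw [fillRowB_eq, if_pos hcond] at hpknown
    simp at hpknown
  have hsome : fillRowB (cake.getD p [])
      = some (pySweep ((cake.getD p []).map (fun c => if c = "?" then none else some c))) := by
    rw [fillRowB_eq, if_neg hcondF]
  have hmemp : cake.getD p [] ∈ cake := by
    rw [List.getD_eq_getElem?_getD, List.getElem?_eq_getElem hplen]
    exact List.getElem_mem hplen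
  have hlenp : (cake.getD p []).length = C := hrect _ hmemp
  have hknownp : (cake.getD p []) = [] ∨ ∃ c ∈ (cake.getD p []), c ≠ "?" := by
    by_cases hnil : cake.getD p [] = []
    · exact Or.inl hnil
    · right
      by_contra hno
      push_neg at hno
      apply hcondF
      rw [Bool.and_eq_true]
      constructor
      · simpa [List.isEmpty_iff] using hnil
      · rw [List.all_map, List.all_eq_true]
        intro c hc
        simp [hno c hc]
  show ck1.getD p [] = ((fun r => List.map (fun o => o.getD "?") (r.getD []))
      ∘ fun j => specAt ys j) i
  simp only [Function.comp]
  rw [hget1 p, if_pos ⟨hpmem, hplen⟩]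
  rw [specAt_eq_pk ys i (by rw [hsp]; exact hne), hsp, ← hp]
  rw [hysget p hplen, hsome]
  show f (cake.getD p [])
      = (pySweep ((cake.getD p []).map (fun c => if c = "?" then none else some c))).map
          (fun o => o.getD "?")
  rw [hf]
  simp only []
  rw [show C = (cake.getD p []).length from hlenp.symm]
  exact row_equiv (cake.getD p []) hknownp

theorem compute_raises : Claim_raises_compute := by
  unfold Claim_raises_compute
  constructor
  · intro cake _ hr hpre
    obtain ⟨hrect, hex⟩ := hpre
    rcases hr with h0 | ⟨r, hrmem, _, hlen⟩
    · subst h0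
      obtain ⟨r, hrmem, _⟩ := hex
      simp at hrmem
    · have := hrect r hrmem
      omega
  · exact ⟨by decide, by decide, by decide⟩

-- self-check: the raise-witness facts of compute_raises, re-read for the record
theorem pvRaiseWitness_ok :
    Dom_compute pvRaiseWitness_compute ∧ Raises_compute pvRaiseWitness_compute ∧
      compute_alt pvRaiseWitness_compute = pvRaiseWitnessOut_compute :=
  compute_raises.2
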